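-- pv_equiv track=rewrite | github.com/Neologic01/VerilogENV | mul_project/dadda_gen_5.0.py | build_polarity_scheme_array
-- ===== SOURCE A (Python) =====
-- def build_polarity_scheme_array(cell_types_in, set_inv_outs_in):
--     polarity_scheme_out = []
--     polarity_scheme_out.append(1)
--     for ct in cell_types_in:
--         if(set_inv_outs_in[ct] == 1):
--             polarity_scheme_out.append(1 - polarity_scheme_out[-1])
--         else:
--             polarity_scheme_out.append(polarity_scheme_out[-1])
--     return polarity_scheme_out
-- ===== SOURCE B (Python) =====
-- def build_polarity_scheme_array(cell_types_in, set_inv_outs_in):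
--     # Run-length construction: locate the toggle positions (outputs that follow an
--     # inverting cell), then emit constant runs of alternating polarity between them.
--     n = len(cell_types_in)
--     cuts = [i + 1 for i, ct in enumerate(cell_types_in) if set_inv_outs_in[ct] == 1]
--     out = []
--     v = 1
--     prev = 0
--     for c in cuts + [n + 1]:
--         out.extend([v] * (c - prev))
--         v = 1 - v
--         prev = c
--     return out
-- ===== Notes on version B (the rewrite author's own statement) =====
-- stated objective: alternative
-- what changed: B first collects the toggle positions (indices after inverting cells) and then builds the output as constant runs of alternating polarity via run-length expansion, instead of A's element-by-element loop that back-references the last element of the growing output list.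
import Mathlib
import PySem

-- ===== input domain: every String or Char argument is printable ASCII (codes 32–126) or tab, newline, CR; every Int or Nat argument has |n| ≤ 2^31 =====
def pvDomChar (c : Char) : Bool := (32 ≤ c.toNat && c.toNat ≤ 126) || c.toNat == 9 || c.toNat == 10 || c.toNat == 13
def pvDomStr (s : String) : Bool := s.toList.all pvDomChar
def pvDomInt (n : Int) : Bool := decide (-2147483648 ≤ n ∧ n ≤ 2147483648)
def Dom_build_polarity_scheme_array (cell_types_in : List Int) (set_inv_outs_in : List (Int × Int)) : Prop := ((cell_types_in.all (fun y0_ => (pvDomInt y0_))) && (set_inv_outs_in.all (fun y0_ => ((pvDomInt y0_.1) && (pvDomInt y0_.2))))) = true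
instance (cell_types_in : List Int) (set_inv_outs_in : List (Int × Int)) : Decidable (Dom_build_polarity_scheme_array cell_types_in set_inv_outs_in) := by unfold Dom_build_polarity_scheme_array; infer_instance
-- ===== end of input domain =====

-- B replaces A's element-by-element loop with a run-length construction (find toggle
-- positions, then emit constant runs of alternating polarity); objective: alternative.

-- ===== PORT A =====
-- A: single loop appending 1 - out[-1] or out[-1] depending on the dict lookup.
-- out[-1] is ported as getLastD 0; the accumulator is never empty, so this is exact.
def build_polarity_scheme_array (cell_types_in : List Int) (set_inv_outs_in : List (Int × Int)) : List Int :=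
  List.foldl (fun out ct =>
    if PySem.Dict.getD (PySem.Dict.ofList set_inv_outs_in) ct 0 = 1 then
      out ++ [1 - out.getLastD 0]
    else
      out ++ [out.getLastD 0]) [1] cell_types_in

-- ===== PORT B =====
-- B: collect the toggle positions (cuts), then expand to constant runs of
-- alternating polarity; out.extend([v] * (c - prev)) is the replicate append.
def build_polarity_scheme_array_alt (cell_types_in : List Int) (set_inv_outs_in : List (Int × Int)) : List Int :=
  let n : Int := cell_types_in.length
  let cuts : List Int := (PySem.List.enumerate cell_types_in).filterMap
    (fun p => if PySem.Dict.getD (PySem.Dict.ofList set_inv_outs_in) p.2 0 = 1 then some (p.1 + 1) else none)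
  (List.foldl (fun (s : List Int × Int × Int) c =>
      (s.1 ++ List.replicate (c - s.2.2).toNat s.2.1, 1 - s.2.1, c))
    ([], 1, 0) (cuts ++ [n + 1])).1

-- ===== PRECONDITION & SPEC =====
-- Pre_ excludes exactly the inputs on which Python A raises KeyError (a cell type
-- missing from the dict); Python B raises there too.
def Pre_build_polarity_scheme_array (cell_types_in : List Int) (set_inv_outs_in : List (Int × Int)) : Prop :=
  ∀ ct ∈ cell_types_in, (PySem.Dict.get? (PySem.Dict.ofList set_inv_outs_in) ct).isSome = true
instance (cell_types_in : List Int) (set_inv_outs_in : List (Int × Int)) : Decidable (Pre_build_polarity_scheme_array cell_types_in set_inv_outs_in) := by unfold Pre_build_polarity_scheme_array; infer_instance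

def pvWitness_build_polarity_scheme_array : List Int × (List (Int × Int)) := ([0, 1, 1, 0], [(0, 1), (1, 0)])

def Spec_build_polarity_scheme_array (cell_types_in : List Int) (set_inv_outs_in : List (Int × Int)) (out : List Int) : Prop := out = build_polarity_scheme_array_alt cell_types_in set_inv_outs_in
instance (cell_types_in : List Int) (set_inv_outs_in : List (Int × Int)) (out : List Int) : Decidable (Spec_build_polarity_scheme_array cell_types_in set_inv_outs_in out) := by unfold Spec_build_polarity_scheme_array; infer_instance

-- ===== CLAIM (what is proved, stated in full; the proofs are below) =====
def Claim_equal_build_polarity_scheme_array : Prop := ∀ (cell_types_in : List Int) (set_inv_outs_in : List (Int × Int)), Dom_build_polarity_scheme_array cell_types_in set_inv_outs_in → Pre_build_polarity_scheme_array cell_types_in set_inv_outs_in → Spec_build_polarity_scheme_array cell_types_in set_inv_outs_in (build_polarity_scheme_array cell_types_in set_inv_outs_in)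

-- ===== LEMMAS AND PROOFS =====

-- Common reference value: the tail of the polarity list after the leading element,
-- threaded through the current polarity v.
def pvMidTail (si : List (Int × Int)) : Int → List Int → List Int
  | _, [] => []
  | v, ct :: rest =>
    let v' := if PySem.Dict.getD (PySem.Dict.ofList si) ct 0 = 1 then 1 - v else v
    v' :: pvMidTail si v' rest

-- A's fold appends exactly pvMidTail of the accumulator's last element.
theorem pvA_eq_mid (si : List (Int × Int)) :
    ∀ (cts : List Int) (acc : List Int),
      List.foldl (fun out ct =>
        if PySem.Dict.getD (PySem.Dict.ofList si) ct 0 = 1 then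
          out ++ [1 - out.getLastD 0]
        else
          out ++ [out.getLastD 0]) acc cts
      = acc ++ pvMidTail si (acc.getLastD 0) cts := by
  intro cts
  induction cts with
  | nil => intro acc; simp [pvMidTail]
  | cons ct rest ih =>
    intro acc
    by_cases h : PySem.Dict.getD (PySem.Dict.ofList si) ct 0 = 1
    · simp only [List.foldl_cons, if_pos h, pvMidTail, ih, List.getLastD_concat]
      simp
    · simp only [List.foldl_cons, if_neg h, pvMidTail, ih, List.getLastD_concat]
      simp

-- B's run expansion over the cuts of cts (enumerated from base b) produces the
-- pending run of v followed by v and pvMidTail.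
theorem pvB_expand (si : List (Int × Int)) :
    ∀ (cts : List Int) (b prev : Int) (acc : List Int) (v : Int), prev ≤ b →
      (List.foldl (fun (s : List Int × Int × Int) c =>
          (s.1 ++ List.replicate (c - s.2.2).toNat s.2.1, 1 - s.2.1, c))
        (acc, v, prev)
        (((PySem.List.enumerate cts b).filterMap
            (fun p => if PySem.Dict.getD (PySem.Dict.ofList si) p.2 0 = 1 then some (p.1 + 1) else none))
          ++ [b + cts.length + 1])).1
      = acc ++ List.replicate (b - prev).toNat v ++ v :: pvMidTail si v cts := by
  intro cts
  induction cts with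
  | nil =>
    intro b prev acc v hle
    have : (b + 1 - prev).toNat = (b - prev).toNat + 1 := by omega
    simp [pvMidTail, this, List.replicate_succ']
  | cons ct rest ih =>
    intro b prev acc v hle
    have hsplit : (b + 1 - prev).toNat = (b - prev).toNat + 1 := by omega
    by_cases h : PySem.Dict.getD (PySem.Dict.ofList si) ct 0 = 1
    · simp only [PySem.List.enumerate_cons, List.filterMap_cons, if_pos h, pvMidTail]
      have harith : b + (ct :: rest).length + 1 = (b + 1) + rest.length + 1 := by
        simp; omega
      rw [harith]
      simp only [List.cons_append, List.foldl_cons]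
      rw [ih (b + 1) (b + 1) (acc ++ List.replicate (b + 1 - prev).toNat v) (1 - v) le_rfl]
      simp [hsplit, List.replicate_succ']
    · simp only [PySem.List.enumerate_cons, List.filterMap_cons, if_neg h, pvMidTail]
      have harith : b + (ct :: rest).length + 1 = (b + 1) + rest.length + 1 := by
        simp; omega
      rw [harith]
      rw [ih (b + 1) prev acc v (by omega)]
      simp [hsplit, List.replicate_succ']

-- ===== VERDICT (by name: the statement is the Claim_ definition above) =====
theorem build_polarity_scheme_array_spec : Claim_equal_build_polarity_scheme_array := by
  intro cts si _ _
  unfold Spec_build_polarity_scheme_array build_polarity_scheme_array build_polarity_scheme_array_alt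
  rw [pvA_eq_mid si cts [1]]
  have h := pvB_expand si cts 0 0 [] 1 le_rfl
  rw [show (0 : Int) + (cts.length : Int) + 1 = (cts.length : Int) + 1 from by ring] at h
  simpa using h.symm
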